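-- pv_equiv track=rewrite | github.com/yongkun521/DecoScreenBeautifier | src/core/layout_config.py | canonical_component_base_id
-- ===== SOURCE A (Python) =====
-- from typing import Dict, List, Optional, Tuple
--
-- BASE_COMPONENTS: Dict[str, str] = {
--     "p_hardware": "HardwareMonitor",
--     "p_network": "NetworkMonitor",
--     "p_clock": "ClockWidget",
--     "p_audio": "AudioVisualizer",
--     "p_image": "ImageWidget",
--     "p_ticker": "InfoTicker",
--     "p_badge": "StatusBadge",
--     "p_stream": "DataStreamWidget",
-- }
--
-- def canonical_component_base_id(component_id: object) -> Optional[str]: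
--     text = str(component_id or "").strip()
--     if not text:
--         return None
--     for base_id in sorted(BASE_COMPONENTS, key=len, reverse=True):
--         if text == base_id or text.startswith(f"{base_id}_"):
--             return base_id
--     return None
-- ===== SOURCE B (Python) =====
-- from typing import Dict, Optional
--
-- BASE_COMPONENTS: Dict[str, str] = {
--     "p_hardware": "HardwareMonitor",
--     "p_network": "NetworkMonitor",
--     "p_clock": "ClockWidget",
--     "p_audio": "AudioVisualizer",
--     "p_image": "ImageWidget",
--     "p_ticker": "InfoTicker",
--     "p_badge": "StatusBadge",
--     "p_stream": "DataStreamWidget",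
-- }
--
-- def _candidate(text: str) -> str:
--     # cut text at its second underscore (if any): that is the only shape a base id can have
--     j = text.find("_", text.find("_") + 1)
--     return text if j == -1 else text[:j]
--
-- def canonical_component_base_id(component_id: object) -> Optional[str]:
--     text = str(component_id or "").strip()
--     if not text:
--         return None
--     candidate = _candidate(text)
--     return candidate if candidate in BASE_COMPONENTS else None
-- ===== Notes on version B (the rewrite author's own statement) =====
-- stated objective: idiomatic
-- what changed: Instead of sorting the key table by length on every call and linearly scanning it for the longest matching prefix, B cuts the text at its second underscore (the only shape a base id can have) and does a single dictionary membership test on that candidate.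
import Mathlib
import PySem

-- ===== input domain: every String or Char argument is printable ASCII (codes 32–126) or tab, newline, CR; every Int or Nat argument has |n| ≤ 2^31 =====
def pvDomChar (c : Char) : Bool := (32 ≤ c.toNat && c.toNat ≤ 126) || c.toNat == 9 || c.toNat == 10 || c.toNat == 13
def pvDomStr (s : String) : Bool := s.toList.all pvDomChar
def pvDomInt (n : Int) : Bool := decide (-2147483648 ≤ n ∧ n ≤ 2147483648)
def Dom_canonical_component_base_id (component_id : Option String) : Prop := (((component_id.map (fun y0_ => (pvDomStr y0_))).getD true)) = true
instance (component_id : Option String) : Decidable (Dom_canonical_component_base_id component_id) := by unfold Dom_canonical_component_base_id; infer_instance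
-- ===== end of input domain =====

-- B replaces A's per-call sort + linear longest-prefix scan over the key table by a single
-- parse (cut the text at its second underscore) followed by one dictionary membership test (objective: idiomatic).

-- ===== PORT A =====
def BASE_COMPONENTS : PySem.Dict String String := PySem.Dict.mk
  [("p_hardware", "HardwareMonitor"), ("p_network", "NetworkMonitor"),
   ("p_clock", "ClockWidget"), ("p_audio", "AudioVisualizer"),
   ("p_image", "ImageWidget"), ("p_ticker", "InfoTicker"),
   ("p_badge", "StatusBadge"), ("p_stream", "DataStreamWidget")]

def canonical_component_base_id_loop (text : String) : List String → Option String
  | [] => none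
  | base_id :: rest =>
      if text == base_id || PySem.Str.startswith text (base_id ++ "_") then some base_id
      else canonical_component_base_id_loop text rest

def canonical_component_base_id (component_id : Option String) : Option String :=
  let text := PySem.Str.strip (component_id.getD "")
  if text == "" then none
  else canonical_component_base_id_loop text
        (PySem.List.sorted BASE_COMPONENTS.keys (fun s => PySem.Str.len s) true)

-- ===== PORT B =====
-- cut text at its second underscore (if any): that is the only shape a base id can have
def pv_candidate (text : String) : String :=
  let j := PySem.Str.findFrom text "_" (PySem.Str.find text "_" + 1)
  if j == -1 then text else PySem.Str.slice text none (some j)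

def canonical_component_base_id_alt (component_id : Option String) : Option String :=
  let text := PySem.Str.strip (component_id.getD "")
  if text == "" then none
  else
    let candidate := pv_candidate text
    if BASE_COMPONENTS.contains candidate then some candidate else none

-- ===== PRECONDITION & SPEC =====
def Spec_canonical_component_base_id (component_id : Option String) (out : Option String) : Prop := out = canonical_component_base_id_alt component_id
instance (component_id : Option String) (out : Option String) : Decidable (Spec_canonical_component_base_id component_id out) := by unfold Spec_canonical_component_base_id; infer_instance

-- ===== CLAIM (what is proved, stated in full; the proofs are below) =====
def Claim_equal_canonical_component_base_id : Prop := ∀ (component_id : Option String), Dom_canonical_component_base_id component_id → Spec_canonical_component_base_id component_id (canonical_component_base_id component_id)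

-- ===== LEMMAS AND PROOFS =====
theorem find_single_none (w : List Char) (h : '_' ∉ w) : PySem.Chars.find w ['_'] = -1 := by
  rw [PySem.Chars.find_eq_neg_one_iff]
  rintro ⟨s, t, hst⟩
  exact h (by rw [← hst]; simp)

theorem find_single_append (w r : List Char) (h : '_' ∉ w) :
    PySem.Chars.find (w ++ '_' :: r) ['_'] = (w.length : Int) := by
  have hge : 0 ≤ PySem.Chars.find (w ++ '_' :: r) ['_'] :=
    (PySem.Chars.find_nonneg_iff _ _).mpr ⟨w, r, by simp⟩
  obtain ⟨hpre, hmin⟩ := PySem.Chars.find_spec hge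
  set n := (PySem.Chars.find (w ++ '_' :: r) ['_']).toNat with hn
  have hne : n = w.length := by
    rcases Nat.lt_trichotomy n w.length with hlt | he | hgt
    · exfalso
      rw [List.drop_append_of_le_length hlt.le, List.drop_eq_getElem_cons hlt] at hpre
      rcases List.cons_prefix_iff.mp hpre with ⟨l', hl', -⟩
      injection hl' with h1 h2
      exact h (h1 ▸ List.getElem_mem _)
    · exact he
    · exact absurd (show ['_'] <+: List.drop w.length (w ++ '_' :: r) by
        rw [List.drop_left]; exact ⟨r, rfl⟩) (hmin _ hgt)
  omega

theorem underscore_toList : ("_" : String).toList = ['_'] := by decide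

theorem cand_match (t k : String) (w : List Char) (hk : k.toList = 'p' :: '_' :: w)
    (hnw : '_' ∉ w) (h : t = k ∨ (k.toList ++ ['_']) <+: t.toList) : pv_candidate t = k := by
  rcases h with rfl | ⟨r, hr⟩
  · -- t = k: single key, no second underscore
    have hfind : PySem.Str.find t "_" = 1 := by
      rw [PySem.Str.find_eq, underscore_toList, hk]
      simpa using find_single_append ['p'] w (by simp)
    have h2 : PySem.Str.findFrom t "_" 2 = -1 := by
      rw [PySem.Str.findFrom_eq, underscore_toList]
      have hlen : (2 : ℕ) ≤ t.toList.length := by rw [hk]; simp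
      rw [show (2 : ℤ) = ((2 : ℕ) : ℤ) by norm_num, PySem.Chars.findFrom_natCast _ _ 2 hlen]
      rw [hk]
      simp [find_single_none w hnw]
    unfold pv_candidate
    rw [hfind, show (1:ℤ)+1 = 2 from rfl, h2]
    simp
  · -- t = k ++ "_" ++ r
    have ht : t.toList = 'p' :: '_' :: (w ++ '_' :: r) := by
      rw [← hr, hk]; simp
    have hfind : PySem.Str.find t "_" = 1 := by
      rw [PySem.Str.find_eq, underscore_toList, ht]
      simpa using find_single_append ['p'] (w ++ '_' :: r) (by simp)
    have h2 : PySem.Str.findFrom t "_" 2 = 2 + (w.length : ℤ) := by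
      rw [PySem.Str.findFrom_eq, underscore_toList]
      have hlen : (2 : ℕ) ≤ t.toList.length := by rw [ht]; simp
      rw [show (2 : ℤ) = ((2 : ℕ) : ℤ) by norm_num, PySem.Chars.findFrom_natCast _ _ 2 hlen]
      rw [ht]
      simp [find_single_append w r hnw]
    unfold pv_candidate
    rw [hfind, show (1:ℤ)+1 = 2 from rfl, h2]
    rw [if_neg (by simp; omega)]
    rw [← String.toList_inj, PySem.Str.toList_slice, PySem.Chars.slice_eq_listSlice,
      PySem.List.slice_to _ (by omega : (0:ℤ) ≤ 2 + (w.length : ℤ))]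
    have hn : ((2 + (w.length : ℤ))).toNat = ('p' :: '_' :: w).length := by simp; omega
    rw [hn, ht, hk]
    exact List.take_left' rfl

theorem cand_inv (t k : String) (h : pv_candidate t = k) :
    t = k ∨ (k.toList ++ ['_']) <+: t.toList := by
  unfold pv_candidate at h
  set j := PySem.Str.findFrom t "_" (PySem.Str.find t "_" + 1) with hj
  by_cases hneg : j = -1
  · left; simpa [hneg] using h
  · right
    rw [if_neg (by simpa using hneg)] at h
    -- establish 0 ≤ j and '_' at position j.toNat
    have hkey : 0 ≤ j ∧ ['_'] <+: t.toList.drop j.toNat := by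
      rw [PySem.Str.findFrom_eq, underscore_toList] at hj
      rcases le_or_gt 0 (PySem.Chars.find t.toList ['_']) with hf | hf
      · -- first find succeeded
        obtain ⟨hpre, -⟩ := PySem.Chars.find_spec hf
        have hlt : (PySem.Chars.find t.toList ['_']).toNat < t.toList.length := by
          have h1 : t.toList.drop (PySem.Chars.find t.toList ['_']).toNat ≠ [] := by
            rcases hpre with ⟨rest, hrest⟩
            rw [← hrest]; simp
          rw [ne_eq, List.drop_eq_nil_iff] at h1
          omega
        set m := (PySem.Chars.find t.toList ['_']).toNat + 1 with hm
        have hcast : PySem.Chars.find t.toList ['_'] + 1 = (m : ℤ) := by omega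
        rw [PySem.Str.find_eq, underscore_toList, hcast,
          PySem.Chars.findFrom_natCast _ _ m (by omega)] at hj
        by_cases hd : PySem.Chars.find (t.toList.drop m) ['_'] = -1
        · exact absurd (by rw [hj, if_pos hd]) hneg
        · rw [if_neg hd] at hj
          have hd0 : 0 ≤ PySem.Chars.find (t.toList.drop m) ['_'] := by
            have := PySem.Chars.neg_one_le_find (t.toList.drop m) ['_']
            omega
          obtain ⟨hpre2, -⟩ := PySem.Chars.find_spec hd0
          rw [List.drop_drop] at hpre2
          constructor
          · omega
          · have : j.toNat = m + (PySem.Chars.find (t.toList.drop m) ['_']).toNat := by omega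
            rw [this]
            exact hpre2
      · -- first find = -1, so start is 0 and j = find = -1, contradiction
        have hf1 : PySem.Chars.find t.toList ['_'] = -1 := by
          have := PySem.Chars.neg_one_le_find t.toList ['_']
          omega
        rw [PySem.Str.find_eq, underscore_toList, hf1] at hj
        norm_num [PySem.Chars.findFrom_zero] at hj
        exact absurd (hj.trans hf1) hneg
    obtain ⟨hj0, rest, hrest⟩ := hkey
    have hdrop : t.toList.drop j.toNat = '_' :: rest := by simpa using hrest.symm
    have hk2 : k.toList = t.toList.take j.toNat := by
      rw [← h, PySem.Str.toList_slice, PySem.Chars.slice_eq_listSlice, PySem.List.slice_to _ hj0]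
    refine ⟨rest, ?_⟩
    rw [hk2]
    conv_rhs => rw [← List.take_append_drop j.toNat t.toList]
    rw [hdrop]
    simp

theorem cond_of_cand (t k : String) (h : pv_candidate t = k) :
    (t == k || PySem.Str.startswith t (k ++ "_")) = true := by
  rcases cand_inv t k h with rfl | hp
  · simp
  · have hs : PySem.Str.startswith t (k ++ "_") = true := by
      rw [PySem.Str.startswith_eq]
      apply (PySem.Chars.startswith_iff _ _).mpr
      simpa [underscore_toList] using hp
    simp only [hs, Bool.or_true]

theorem alt_branch (t k : String) (w : List Char) (hk : k.toList = 'p' :: '_' :: w)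
    (hnw : '_' ∉ w) (hc : BASE_COMPONENTS.contains k = true)
    (h : (t == k || PySem.Str.startswith t (k ++ "_")) = true) :
    (if BASE_COMPONENTS.contains (pv_candidate t) then some (pv_candidate t) else none) = some k := by
  have hd : t = k ∨ (k.toList ++ ['_']) <+: t.toList := by
    simp only [Bool.or_eq_true, beq_iff_eq] at h
    rcases h with h | h
    · exact Or.inl h
    · right
      rw [PySem.Str.startswith_eq] at h
      simpa [underscore_toList] using (PySem.Chars.startswith_iff _ _).mp h
  rw [cand_match t k w hk hnw hd, if_pos hc]

theorem sorted_keys_eq : PySem.List.sorted BASE_COMPONENTS.keys (fun s => PySem.Str.len s) true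
    = ["p_hardware","p_network","p_ticker","p_stream","p_clock","p_audio","p_image","p_badge"] := by
  decide

-- ===== VERDICT (by name: the statement is the Claim_ definition above) =====
theorem canonical_component_base_id_spec : Claim_equal_canonical_component_base_id := by
  intro component_id _
  unfold Spec_canonical_component_base_id
  simp only [canonical_component_base_id, canonical_component_base_id_alt]
  generalize PySem.Str.strip (component_id.getD "") = t
  cases h0 : (t == "") with
  | true => simp
  | false =>
    rw [if_neg (by simp), if_neg (by simp), sorted_keys_eq]
    simp only [canonical_component_base_id_loop]
    by_cases h1 : (t == "p_hardware" || PySem.Str.startswith t ("p_hardware" ++ "_")) = true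
    · rw [if_pos h1, (alt_branch t "p_hardware" "hardware".toList (by decide) (by decide) (by decide) h1)]
    rw [if_neg h1]
    by_cases h2 : (t == "p_network" || PySem.Str.startswith t ("p_network" ++ "_")) = true
    · rw [if_pos h2, (alt_branch t "p_network" "network".toList (by decide) (by decide) (by decide) h2)]
    rw [if_neg h2]
    by_cases h3 : (t == "p_ticker" || PySem.Str.startswith t ("p_ticker" ++ "_")) = true
    · rw [if_pos h3, (alt_branch t "p_ticker" "ticker".toList (by decide) (by decide) (by decide) h3)]
    rw [if_neg h3]
    by_cases h4 : (t == "p_stream" || PySem.Str.startswith t ("p_stream" ++ "_")) = true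
    · rw [if_pos h4, (alt_branch t "p_stream" "stream".toList (by decide) (by decide) (by decide) h4)]
    rw [if_neg h4]
    by_cases h5 : (t == "p_clock" || PySem.Str.startswith t ("p_clock" ++ "_")) = true
    · rw [if_pos h5, (alt_branch t "p_clock" "clock".toList (by decide) (by decide) (by decide) h5)]
    rw [if_neg h5]
    by_cases h6 : (t == "p_audio" || PySem.Str.startswith t ("p_audio" ++ "_")) = true
    · rw [if_pos h6, (alt_branch t "p_audio" "audio".toList (by decide) (by decide) (by decide) h6)]
    rw [if_neg h6]
    by_cases h7 : (t == "p_image" || PySem.Str.startswith t ("p_image" ++ "_")) = true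
    · rw [if_pos h7, (alt_branch t "p_image" "image".toList (by decide) (by decide) (by decide) h7)]
    rw [if_neg h7]
    by_cases h8 : (t == "p_badge" || PySem.Str.startswith t ("p_badge" ++ "_")) = true
    · rw [if_pos h8, (alt_branch t "p_badge" "badge".toList (by decide) (by decide) (by decide) h8)]
    rw [if_neg h8]
    rw [if_neg ?hcontains]
    case hcontains =>
      intro hc
      simp only [BASE_COMPONENTS, PySem.Dict.contains_mk, List.any_cons, List.any_nil,
        Bool.or_eq_true, beq_iff_eq] at hc
      rcases hc with h|h|h|h|h|h|h|h|h
      · exact h1 (cond_of_cand t _ h.symm)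
      · exact h2 (cond_of_cand t _ h.symm)
      · exact h5 (cond_of_cand t _ h.symm)
      · exact h6 (cond_of_cand t _ h.symm)
      · exact h7 (cond_of_cand t _ h.symm)
      · exact h3 (cond_of_cand t _ h.symm)
      · exact h8 (cond_of_cand t _ h.symm)
      · exact h4 (cond_of_cand t _ h.symm)
      · exact absurd h Bool.false_ne_true
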